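-- pv_equiv track=rewrite | github.com/Park-Young-Hun/Algorithm | Programmers/표편집.py | solution
-- ===== SOURCE A (Python) =====
-- def solution(n, k, cmd):
--     table = {x: [x - 1, x + 1] for x in range(n)}
--     answer = ['O' for _ in range(n)]
--     clear = []
--
--     for c in cmd:
--         detail = c.split()
--
--         if detail[0] == 'C':
--             before, after = table[k]
--             clear.append((before, after, k))
--             answer[k] = 'X'
--
--             if before == -1:
--                 table[after][0] = before
--                 k = after
--             elif after == n:
--                 table[before][1] = after
--                 k = before
--             else:
--                 table[before][1] = after
--                 table[after][0] = before
--                 k = after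
--         elif c == 'Z':
--             before, after, num = clear.pop()
--             answer[num] = 'O'
--
--             if before == -1:
--                 table[after][0] = num
--             elif after == n:
--                 table[before][1] = num
--             else:
--                 table[before][1] = num
--                 table[after][0] = num
--
--         elif detail[0] == 'U':
--             for _ in range(int(detail[1])):
--                 k = table[k][0]
--         elif detail[0] == 'D':
--             for _ in range(int(detail[1])):
--                 k = table[k][1]
--
--     return ''.join(answer)
-- ===== SOURCE B (Python) =====
-- def solution(n, k, cmd):
--     deleted = [False] * n
--     removed = []
--     for c in cmd:
--         d = c.split()
--         if d[0] == 'C':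
--             removed.append(k)
--             deleted[k] = True
--             j = k + 1
--             while j < n and deleted[j]:
--                 j += 1
--             if j < n:
--                 k = j
--             else:
--                 j = k - 1
--                 while j >= 0 and deleted[j]:
--                     j -= 1
--                 k = j
--         elif c == 'Z':
--             deleted[removed.pop()] = False
--         elif d[0] == 'U':
--             for _ in range(int(d[1])):
--                 k -= 1
--                 while k >= 0 and deleted[k]:
--                     k -= 1
--         elif d[0] == 'D':
--             for _ in range(int(d[1])):
--                 k += 1
--                 while k < n and deleted[k]:
--                     k += 1
--     return ''.join('X' if x else 'O' for x in deleted)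
-- ===== Notes on version B (the rewrite author's own statement) =====
-- stated objective: simpler
-- what changed: A maintains a doubly linked list of live rows in a dict (with stored neighbour pointers pushed on the undo stack) while B keeps only a boolean deleted[] array plus a stack of deleted indices, finds the next/previous live row by linear skip-scans, and rebuilds the answer string from the flags at the end.
import Mathlib
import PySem

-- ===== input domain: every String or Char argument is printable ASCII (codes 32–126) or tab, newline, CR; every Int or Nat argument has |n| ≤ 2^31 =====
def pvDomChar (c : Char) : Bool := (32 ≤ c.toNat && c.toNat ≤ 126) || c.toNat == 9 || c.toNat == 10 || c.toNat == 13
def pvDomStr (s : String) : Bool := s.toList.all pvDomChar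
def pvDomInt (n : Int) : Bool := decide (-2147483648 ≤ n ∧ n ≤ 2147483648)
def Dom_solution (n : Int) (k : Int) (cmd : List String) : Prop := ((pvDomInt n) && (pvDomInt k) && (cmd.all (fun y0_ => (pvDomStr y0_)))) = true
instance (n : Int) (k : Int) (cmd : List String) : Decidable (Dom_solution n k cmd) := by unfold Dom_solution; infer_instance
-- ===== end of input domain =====

-- B replaces A's doubly-linked-list dict by a plain boolean deleted[] array with linear
-- skip-scans and rebuilds the answer string from the flags at the end (objective: simpler).

-- ===== PORT A =====
-- A's 2-element list [before, after] is ported as the pair (before, after).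
-- Wherever the Python raises (KeyError/IndexError/ValueError), the port takes a junk
-- default and carries on; exactly those inputs are excluded by Pre_solution below.

-- for _ in range(x): k = table[k][0]
def pvHopU (table : PySem.Dict Int (Int × Int)) (x : Int) (k : Int) : Int :=
  if 0 < x then pvHopU table (x - 1) (table.getD k (0, 0)).1 else k
termination_by x.toNat
decreasing_by omega

-- for _ in range(x): k = table[k][1]
def pvHopD (table : PySem.Dict Int (Int × Int)) (x : Int) (k : Int) : Int :=
  if 0 < x then pvHopD table (x - 1) (table.getD k (0, 0)).2 else k
termination_by x.toNat
decreasing_by omega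

def pvStepA (n : Int) (st : PySem.Dict Int (Int × Int) × List String × List (Int × Int × Int) × Int)
    (c : String) : PySem.Dict Int (Int × Int) × List String × List (Int × Int × Int) × Int :=
  match st with
  | (table, answer, clear, k) =>
    let detail := PySem.Str.split₀ c
    match PySem.List.pyGet? detail 0 with
    | none => (table, answer, clear, k)          -- detail[0]: IndexError (outside Pre_)
    | some t0 =>
      if t0 = "C" then
        let ba := table.getD k (0, 0)            -- table[k]: KeyError → junk (outside Pre_)
        let clear' := clear ++ [(ba.1, ba.2, k)]
        let answer' := answer.set k.toNat "X"
        if ba.1 = -1 then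
          (table.modify ba.2 (0, 0) (fun p => (ba.1, p.2)), answer', clear', ba.2)
        else if ba.2 = n then
          (table.modify ba.1 (0, 0) (fun p => (p.1, ba.2)), answer', clear', ba.1)
        else
          ((table.modify ba.1 (0, 0) (fun p => (p.1, ba.2))).modify ba.2 (0, 0)
            (fun p => (ba.1, p.2)), answer', clear', ba.2)
      else if c = "Z" then
        match PySem.List.pop? clear (-1) with
        | none => (table, answer, clear, k)      -- clear.pop(): IndexError (outside Pre_)
        | some ((b, a, num), clear') =>
          let answer' := answer.set num.toNat "O"
          if b = -1 then
            (table.modify a (0, 0) (fun p => (num, p.2)), answer', clear', k)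
          else if a = n then
            (table.modify b (0, 0) (fun p => (p.1, num)), answer', clear', k)
          else
            ((table.modify b (0, 0) (fun p => (p.1, num))).modify a (0, 0)
              (fun p => (num, p.2)), answer', clear', k)
      else if t0 = "U" then
        match (PySem.List.pyGet? detail 1).bind PySem.Int.ofStr? with
        | none => (table, answer, clear, k)      -- detail[1]/int(): IndexError/ValueError (outside Pre_)
        | some x => (table, answer, clear, pvHopU table x k)
      else if t0 = "D" then
        match (PySem.List.pyGet? detail 1).bind PySem.Int.ofStr? with
        | none => (table, answer, clear, k)
        | some x => (table, answer, clear, pvHopD table x k)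
      else (table, answer, clear, k)

def pvBuildTable (n : Int) : PySem.Dict Int (Int × Int) :=
  (PySem.List.pyRange 0 n 1).foldl (fun d x => d.insert x (x - 1, x + 1)) PySem.Dict.empty

def solution (n : Int) (k : Int) (cmd : List String) : String :=
  let table := pvBuildTable n
  let answer := List.replicate n.toNat "O"
  let st := cmd.foldl (pvStepA n) (table, answer, ([] : List (Int × Int × Int)), k)
  PySem.Str.join "" st.2.1

-- ===== PORT B =====
-- while j >= 0 and deleted[j]: j -= 1
def pvScanDn (del : List Bool) (j : Int) : Int :=
  if 0 ≤ j ∧ del.getD j.toNat false then pvScanDn del (j - 1) else j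
termination_by (j + 1).toNat
decreasing_by omega

-- while j < n and deleted[j]: j += 1   (deleted[j] with n ≤ j < len unreachable inside Pre_)
def pvScanUp (n : Int) (del : List Bool) (j : Int) : Int :=
  if j < n ∧ del.getD j.toNat false then pvScanUp n del (j + 1) else j
termination_by (n - j).toNat
decreasing_by omega

-- for _ in range(x): k -= 1; while k >= 0 and deleted[k]: k -= 1
def pvRepU (del : List Bool) (x : Int) (k : Int) : Int :=
  if 0 < x then pvRepU del (x - 1) (pvScanDn del (k - 1)) else k
termination_by x.toNat
decreasing_by omega

-- for _ in range(x): k += 1; while k < n and deleted[k]: k += 1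
def pvRepD (n : Int) (del : List Bool) (x : Int) (k : Int) : Int :=
  if 0 < x then pvRepD n del (x - 1) (pvScanUp n del (k + 1)) else k
termination_by x.toNat
decreasing_by omega

def pvStepB (n : Int) (st : List Bool × List Int × Int) (c : String) : List Bool × List Int × Int :=
  match st with
  | (del, removed, k) =>
    let d := PySem.Str.split₀ c
    match PySem.List.pyGet? d 0 with
    | none => (del, removed, k)                  -- d[0]: IndexError (outside Pre_)
    | some t0 =>
      if t0 = "C" then
        let removed' := removed ++ [k]
        let del' := del.set k.toNat true         -- deleted[k] = True (negative k outside Pre_)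
        let j := pvScanUp n del' (k + 1)
        if j < n then (del', removed', j)
        else (del', removed', pvScanDn del' (k - 1))
      else if c = "Z" then
        match PySem.List.pop? removed (-1) with
        | none => (del, removed, k)              -- removed.pop(): IndexError (outside Pre_)
        | some (num, removed') => (del.set num.toNat false, removed', k)
      else if t0 = "U" then
        match (PySem.List.pyGet? d 1).bind PySem.Int.ofStr? with
        | none => (del, removed, k)
        | some x => (del, removed, pvRepU del x k)
      else if t0 = "D" then
        match (PySem.List.pyGet? d 1).bind PySem.Int.ofStr? with
        | none => (del, removed, k)
        | some x => (del, removed, pvRepD n del x k)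
      else (del, removed, k)

def pvFlag (b : Bool) : String := if b then "X" else "O"

def solution_alt (n : Int) (k : Int) (cmd : List String) : String :=
  let st := cmd.foldl (pvStepB n) (List.replicate n.toNat false, ([] : List Int), k)
  PySem.Str.join "" (st.1.map pvFlag)

-- ===== PRECONDITION & SPEC =====
-- Pre_solution holds exactly on the inputs where Python A returns normally; everywhere else A
-- raises (IndexError on detail[0]/detail[1]/pop from an empty stack, ValueError from int(),
-- KeyError from table[k] when the cursor leaves the table or the last live row is deleted).
-- Whether a command script is valid is inherently stateful (it depends on where the cursor and
-- the deleted rows are when each command runs), so Pre_ is expressed as an abstract safety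
-- check over (deleted flags, stack size, cursor); it computes no output of either program.
-- The safety checker works on the (small) list of currently deleted row indices — the
-- contents of the undo stack — never on an n-sized array, so it evaluates fast.
def pvScanDnGo (stk : List Int) : Nat → Int → Int
  | 0, j => j
  | fuel + 1, j => if 0 ≤ j ∧ j ∈ stk then pvScanDnGo stk fuel (j - 1) else j

def pvScanDnE (stk : List Int) (j : Int) : Int := pvScanDnGo stk (stk.length + 1) j

def pvScanUpGo (n : Int) (stk : List Int) : Nat → Int → Int
  | 0, j => j
  | fuel + 1, j => if j < n ∧ j ∈ stk then pvScanUpGo n stk fuel (j + 1) else j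

def pvScanUpE (n : Int) (stk : List Int) (j : Int) : Int :=
  pvScanUpGo n stk (stk.length + 1) j

def pvChkUGo (n : Int) (stk : List Int) : Nat → Int → Option Int
  | 0, k => some k
  | fuel + 1, k =>
      if 0 ≤ k ∧ k < n ∧ k ∉ stk then
        pvChkUGo n stk fuel (pvScanDnE stk (k - 1))
      else none

def pvChkU (n : Int) (stk : List Int) (x : Int) (k : Int) : Option Int :=
  pvChkUGo n stk x.toNat k

def pvChkDGo (n : Int) (stk : List Int) : Nat → Int → Option Int
  | 0, k => some k
  | fuel + 1, k =>
      if 0 ≤ k ∧ k < n ∧ k ∉ stk then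
        pvChkDGo n stk fuel (pvScanUpE n stk (k + 1))
      else none

def pvChkD (n : Int) (stk : List Int) (x : Int) (k : Int) : Option Int :=
  pvChkDGo n stk x.toNat k

def pvSafeStep (n : Int) (st : List Int × Int) (c : String) : Option (List Int × Int) :=
  match st with
  | (removed, k) =>
    let d := PySem.Str.split₀ c
    match PySem.List.pyGet? d 0 with
    | none => none
    | some t0 =>
      if t0 = "C" then
        if 0 ≤ k ∧ k < n ∧ k ∉ removed then
          let stk' := removed ++ [k]
          let a := pvScanUpE n stk' (k + 1)
          let b := pvScanDnE stk' (k - 1)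
          if b = -1 ∧ a = n then none
          else some (stk', if a < n then a else b)
        else none
      else if c = "Z" then
        match PySem.List.pop? removed (-1) with
        | none => none
        | some (num, removed') => some (removed', k)
      else if t0 = "U" then
        match (PySem.List.pyGet? d 1).bind PySem.Int.ofStr? with
        | none => none
        | some x => (pvChkU n removed x k).map (fun k' => (removed, k'))
      else if t0 = "D" then
        match (PySem.List.pyGet? d 1).bind PySem.Int.ofStr? with
        | none => none
        | some x => (pvChkD n removed x k).map (fun k' => (removed, k'))
      else some (removed, k)

def pvSafeRun (n : Int) (st : List Int × Int) : List String → Bool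
  | [] => true
  | c :: cs =>
    match pvSafeStep n st c with
    | none => false
    | some st' => pvSafeRun n st' cs

def Pre_solution (n : Int) (k : Int) (cmd : List String) : Prop :=
  pvSafeRun n (([] : List Int), k) cmd = true
instance (n : Int) (k : Int) (cmd : List String) : Decidable (Pre_solution n k cmd) := by
  unfold Pre_solution; infer_instance

def pvWitness_solution : Int × Int × List String := (3, 1, ["C", "Z", "U 1", "D 2"])

def Spec_solution (n : Int) (k : Int) (cmd : List String) (out : String) : Prop := out = solution_alt n k cmd
instance (n : Int) (k : Int) (cmd : List String) (out : String) : Decidable (Spec_solution n k cmd out) := by unfold Spec_solution; infer_instance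

-- ===== CLAIM (what is proved, stated in full; the proofs are below) =====
def Claim_equal_solution : Prop := ∀ (n : Int) (k : Int) (cmd : List String), Dom_solution n k cmd → Pre_solution n k cmd → Spec_solution n k cmd (solution n k cmd)


-- ===== LEMMAS AND PROOFS =====

-- Casts and list-set helpers ------------------------------------------------

theorem pv_getD_set (l : List Bool) (i j : Nat) (b : Bool) (d : Bool) :
    (l.set i b).getD j d = if j = i ∧ i < l.length then b else l.getD j d := by
  simp only [List.getD_eq_getElem?_getD, List.getElem?_set]
  by_cases h1 : j = i
  · subst h1
    by_cases h2 : j < l.length <;> simp [h2]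
  · simp [h1, Ne.symm h1]

theorem pv_set_getD_self (l : List Bool) (i : Nat) (h : i < l.length)
    (hv : l.getD i false = v) : l.set i v = l := by
  subst hv
  simp only [List.getD_eq_getElem?_getD, List.getElem?_eq_getElem h, Option.getD_some]
  exact List.set_getElem_self h

-- Scan lemmas ---------------------------------------------------------------

theorem pvScanDn_le (del : List Bool) (j : Int) : pvScanDn del j ≤ j := by
  unfold pvScanDn
  split
  · have := pvScanDn_le del (j - 1); omega
  · omega
termination_by (j + 1).toNat
decreasing_by omega

theorem pvScanDn_ge (del : List Bool) (j : Int) (h : -1 ≤ j) : -1 ≤ pvScanDn del j := by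
  unfold pvScanDn
  split
  · rename_i hc
    exact pvScanDn_ge del (j - 1) (by omega)
  · omega
termination_by (j + 1).toNat
decreasing_by omega

theorem pvScanDn_neg (del : List Bool) (j : Int) (h : j < 0) : pvScanDn del j = j := by
  unfold pvScanDn
  split
  · omega
  · rfl

theorem pvScanDn_stop (del : List Bool) (j : Int) :
    pvScanDn del j < 0 ∨ del.getD (pvScanDn del j).toNat false = false := by
  unfold pvScanDn
  split
  · exact pvScanDn_stop del (j - 1)
  · rename_i hc
    by_cases h0 : 0 ≤ j
    · right
      simpa [h0] using hc
    · left; omega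
termination_by (j + 1).toNat
decreasing_by omega

theorem pvScanDn_deleted (del : List Bool) (j j' : Int) (h1 : pvScanDn del j < j') (h2 : j' ≤ j) :
    0 ≤ j' ∧ del.getD j'.toNat false = true := by
  rw [pvScanDn] at h1
  split at h1
  · rename_i hc
    by_cases he : j' = j
    · subst he; exact ⟨hc.1, hc.2⟩
    · exact pvScanDn_deleted del (j - 1) j' h1 (by omega)
  · omega
termination_by (j + 1).toNat
decreasing_by omega

theorem pvScanDn_skip (del : List Bool) (m j : Int) (hm : -1 ≤ m) (hmj : m ≤ j)
    (h : ∀ j', m < j' → j' ≤ j → del.getD j'.toNat false = true) :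
    pvScanDn del j = pvScanDn del m := by
  by_cases he : m = j
  · subst he; rfl
  · rw [pvScanDn]
    have hj : 0 ≤ j := by omega
    have hd := h j (by omega) le_rfl
    simp only [hj, hd, and_self, if_true]
    exact pvScanDn_skip del m (j - 1) hm (by omega) (fun j' h1 h2 => h j' h1 (by omega))
termination_by (j + 1).toNat
decreasing_by omega

theorem pvScanDn_set_out (del : List Bool) (kk j : Int) (v : Bool) (hk : 0 ≤ kk) (hj : j < kk) :
    pvScanDn (del.set kk.toNat v) j = pvScanDn del j := by
  by_cases h0 : 0 ≤ j
  · have hg : (del.set kk.toNat v).getD j.toNat false = del.getD j.toNat false := by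
      rw [pv_getD_set]
      have : ¬(j.toNat = kk.toNat ∧ kk.toNat < del.length) := by
        rintro ⟨h1, _⟩; omega
      simp [this]
    rw [pvScanDn]
    conv_rhs => rw [pvScanDn]
    rw [hg]
    split
    · exact pvScanDn_set_out del kk (j - 1) v hk (by omega)
    · rfl
  · rw [pvScanDn_neg _ _ (by omega), pvScanDn_neg _ _ (by omega)]
termination_by (j + 1).toNat
decreasing_by omega

theorem pvScanUp_ge (n : Int) (del : List Bool) (j : Int) : j ≤ pvScanUp n del j := by
  unfold pvScanUp
  split
  · have := pvScanUp_ge n del (j + 1); omega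
  · omega
termination_by (n - j).toNat
decreasing_by omega

theorem pvScanUp_le (n : Int) (del : List Bool) (j : Int) (h : j ≤ n) : pvScanUp n del j ≤ n := by
  unfold pvScanUp
  split
  · rename_i hc
    exact pvScanUp_le n del (j + 1) (by omega)
  · omega
termination_by (n - j).toNat
decreasing_by omega

theorem pvScanUp_stop (n : Int) (del : List Bool) (j : Int) :
    n ≤ pvScanUp n del j ∨ del.getD (pvScanUp n del j).toNat false = false := by
  unfold pvScanUp
  split
  · exact pvScanUp_stop n del (j + 1)
  · rename_i hc
    by_cases h0 : j < n
    · right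
      have : del.getD j.toNat false = false := by
        by_contra h
        exact hc ⟨h0, by simpa using h⟩
      simpa using this
    · left; omega
termination_by (n - j).toNat
decreasing_by omega

theorem pvScanUp_deleted (n : Int) (del : List Bool) (j j' : Int) (h1 : j ≤ j')
    (h2 : j' < pvScanUp n del j) : j' < n ∧ del.getD j'.toNat false = true := by
  rw [pvScanUp] at h2
  split at h2
  · rename_i hc
    by_cases he : j' = j
    · subst he; exact ⟨hc.1, hc.2⟩
    · exact pvScanUp_deleted n del (j + 1) j' (by omega) h2
  · omega
termination_by (n - j).toNat
decreasing_by omega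

theorem pvScanUp_skip (n : Int) (del : List Bool) (j m : Int) (hmj : j ≤ m)
    (h : ∀ j', j ≤ j' → j' < m → j' < n ∧ del.getD j'.toNat false = true) :
    pvScanUp n del j = pvScanUp n del m := by
  by_cases he : j = m
  · subst he; rfl
  · rw [pvScanUp]
    have hd := h j le_rfl (by omega)
    simp only [hd.1, hd.2, and_self, if_true]
    exact pvScanUp_skip n del (j + 1) m (by omega) (fun j' h1 h2 => h j' (by omega) h2)
termination_by (m - j).toNat
decreasing_by omega

theorem pvScanUp_set_out (n : Int) (del : List Bool) (kk j : Int) (v : Bool) (hk : 0 ≤ kk)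
    (hj : kk < j) : pvScanUp n (del.set kk.toNat v) j = pvScanUp n del j := by
  have hg : (del.set kk.toNat v).getD j.toNat false = del.getD j.toNat false := by
    rw [pv_getD_set]
    have : ¬(j.toNat = kk.toNat ∧ kk.toNat < del.length) := by
      rintro ⟨h1, _⟩; omega
    simp [this]
  rw [pvScanUp]
  conv_rhs => rw [pvScanUp]
  rw [hg]
  split
  · exact pvScanUp_set_out n del kk (j + 1) v hk (by omega)
  · rfl
termination_by (n - j).toNat
decreasing_by omega

theorem pvScanDn_set_true (del : List Bool) (kk : Int) (j : Int) (hk0 : 0 ≤ kk)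
    (hk2 : kk.toNat < del.length) (hkd : del.getD kk.toNat false = false) :
    pvScanDn (del.set kk.toNat true) j =
      if pvScanDn del j = kk then pvScanDn del (kk - 1) else pvScanDn del j := by
  by_cases h0 : 0 ≤ j
  · by_cases he : j = kk
    · subst he
      rw [pvScanDn]
      have hg : (del.set j.toNat true).getD j.toNat false = true := by
        rw [pv_getD_set]; simp [hk2]
      rw [hg]
      simp only [h0, and_true, if_true, true_and]
      rw [pvScanDn_set_out del j (j - 1) true h0 (by omega)]
      have : pvScanDn del j = j := by
        rw [pvScanDn, hkd]; simp
      simp [this]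
    · have hg : (del.set kk.toNat true).getD j.toNat false = del.getD j.toNat false := by
        rw [pv_getD_set]
        have : ¬(j.toNat = kk.toNat ∧ kk.toNat < del.length) := by
          rintro ⟨h1, _⟩; omega
        simp [this]
      rw [pvScanDn]
      conv_rhs => rw [pvScanDn]
      rw [hg]
      split
      · exact pvScanDn_set_true del kk (j - 1) hk0 hk2 hkd
      · simp [he]
  · rw [pvScanDn_neg _ _ (by omega), pvScanDn_neg _ _ (by omega)]
    have : ¬ (j = kk) := by omega
    simp [this]
termination_by (j + 1).toNat
decreasing_by omega

theorem pvScanDn_set_false (del : List Bool) (kk : Int) (j : Int) (hk0 : 0 ≤ kk)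
    (hk2 : kk.toNat < del.length) (hkd : del.getD kk.toNat false = true) :
    pvScanDn (del.set kk.toNat false) j =
      if pvScanDn del j < kk ∧ kk ≤ j then kk else pvScanDn del j := by
  by_cases h0 : 0 ≤ j
  · by_cases he : j = kk
    · subst he
      have hg : (del.set j.toNat false).getD j.toNat false = false := by
        rw [pv_getD_set]; simp [hk2]
      rw [pvScanDn, hg]
      simp only [Bool.false_eq_true, and_false, if_false]
      have hrec : pvScanDn del j = pvScanDn del (j - 1) := by
        rw [pvScanDn, if_pos ⟨h0, hkd⟩]
      have hle := pvScanDn_le del (j - 1)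
      rw [hrec, if_pos ⟨by omega, le_refl j⟩]
    · have hg : (del.set kk.toNat false).getD j.toNat false = del.getD j.toNat false := by
        rw [pv_getD_set]
        have : ¬(j.toNat = kk.toNat ∧ kk.toNat < del.length) := by
          rintro ⟨h1, _⟩; omega
        simp [this]
      rw [pvScanDn, hg]
      by_cases hc : 0 ≤ j ∧ del.getD j.toNat false = true
      · rw [if_pos hc, pvScanDn_set_false del kk (j - 1) hk0 hk2 hkd]
        have hrec : pvScanDn del j = pvScanDn del (j - 1) := by
          rw [pvScanDn, if_pos hc]
        rw [hrec]
        by_cases h2 : pvScanDn del (j - 1) < kk ∧ kk ≤ j - 1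
        · rw [if_pos h2, if_pos ⟨h2.1, by omega⟩]
        · have h3 : ¬ (pvScanDn del (j - 1) < kk ∧ kk ≤ j) := by
            rintro ⟨ha, hb⟩; exact h2 ⟨ha, by omega⟩
          rw [if_neg h2, if_neg h3]
      · rw [if_neg hc]
        have hrec : pvScanDn del j = j := by
          rw [pvScanDn, if_neg hc]
        rw [hrec, if_neg (by omega)]
  · rw [pvScanDn_neg _ _ (by omega), pvScanDn_neg _ _ (by omega), if_neg (by omega)]
termination_by (j + 1).toNat
decreasing_by omega

theorem pvScanUp_set_true (n : Int) (del : List Bool) (kk : Int) (j : Int) (hk0 : 0 ≤ kk)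
    (hkn : kk < n) (hk2 : kk.toNat < del.length) (hkd : del.getD kk.toNat false = false)
    (hj : 0 ≤ j) :
    pvScanUp n (del.set kk.toNat true) j =
      if pvScanUp n del j = kk then pvScanUp n del (kk + 1) else pvScanUp n del j := by
  by_cases hn : j < n
  · by_cases he : j = kk
    · subst he
      rw [pvScanUp]
      have hg : (del.set j.toNat true).getD j.toNat false = true := by
        rw [pv_getD_set]; simp [hk2]
      rw [hg]
      simp only [hn, and_true, if_true, true_and]
      rw [pvScanUp_set_out n del j (j + 1) true hj (by omega)]
      have : pvScanUp n del j = j := by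
        rw [pvScanUp, hkd]; simp
      simp [this]
    · have hg : (del.set kk.toNat true).getD j.toNat false = del.getD j.toNat false := by
        rw [pv_getD_set]
        have : ¬(j.toNat = kk.toNat ∧ kk.toNat < del.length) := by
          rintro ⟨h1, _⟩; omega
        simp [this]
      rw [pvScanUp]
      conv_rhs => rw [pvScanUp]
      rw [hg]
      split
      · exact pvScanUp_set_true n del kk (j + 1) hk0 hkn hk2 hkd (by omega)
      · simp [he]
  · rw [pvScanUp]
    conv_rhs => rw [pvScanUp]
    simp only [hn, false_and, if_false]
    have : ¬ (j = kk) := by omega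
    simp [this]
termination_by (n - j).toNat
decreasing_by omega

theorem pvScanUp_set_false (n : Int) (del : List Bool) (kk : Int) (j : Int) (hk0 : 0 ≤ kk)
    (hkn : kk < n) (hk2 : kk.toNat < del.length) (hkd : del.getD kk.toNat false = true)
    (hj : 0 ≤ j) :
    pvScanUp n (del.set kk.toNat false) j =
      if j ≤ kk ∧ kk < pvScanUp n del j then kk else pvScanUp n del j := by
  by_cases hn : j < n
  · by_cases he : j = kk
    · subst he
      have hg : (del.set j.toNat false).getD j.toNat false = false := by
        rw [pv_getD_set]; simp [hk2]
      rw [pvScanUp, hg]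
      simp only [Bool.false_eq_true, and_false, if_false]
      have hrec : pvScanUp n del j = pvScanUp n del (j + 1) := by
        rw [pvScanUp, if_pos ⟨hn, hkd⟩]
      have hge := pvScanUp_ge n del (j + 1)
      rw [hrec, if_pos ⟨le_refl j, by omega⟩]
    · have hg : (del.set kk.toNat false).getD j.toNat false = del.getD j.toNat false := by
        rw [pv_getD_set]
        have : ¬(j.toNat = kk.toNat ∧ kk.toNat < del.length) := by
          rintro ⟨h1, _⟩; omega
        simp [this]
      rw [pvScanUp, hg]
      by_cases hc : j < n ∧ del.getD j.toNat false = true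
      · rw [if_pos hc, pvScanUp_set_false n del kk (j + 1) hk0 hkn hk2 hkd (by omega)]
        have hrec : pvScanUp n del j = pvScanUp n del (j + 1) := by
          rw [pvScanUp, if_pos hc]
        rw [hrec]
        by_cases h2 : j + 1 ≤ kk ∧ kk < pvScanUp n del (j + 1)
        · rw [if_pos h2, if_pos ⟨by omega, h2.2⟩]
        · have h3 : ¬ (j ≤ kk ∧ kk < pvScanUp n del (j + 1)) := by
            rintro ⟨ha, hb⟩
            exact h2 ⟨by omega, hb⟩
          rw [if_neg h2, if_neg h3]
      · rw [if_neg hc]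
        have hrec : pvScanUp n del j = j := by
          rw [pvScanUp, if_neg hc]
        rw [hrec, if_neg (by omega)]
  · have h1 : pvScanUp n (del.set kk.toNat false) j = j := by
      rw [pvScanUp, if_neg (by rintro ⟨h, _⟩; omega)]
    have h2 : pvScanUp n del j = j := by
      rw [pvScanUp, if_neg (by rintro ⟨h, _⟩; omega)]
    rw [h1, h2, if_neg (by omega)]
termination_by (n - j).toNat
decreasing_by omega

-- neighbour identification: if the first live index below i is kk, then the first live
-- index above kk is i (both indices live), and vice versa
theorem pvUp_of_dn (n : Int) (del : List Bool) (i kk : Int) (hi0 : 0 ≤ i) (hin : i < n)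
    (hlive : del.getD i.toNat false = false) (hkk : pvScanDn del (i - 1) = kk) (hk0 : 0 ≤ kk) :
    pvScanUp n del (kk + 1) = i := by
  have hle : kk ≤ i - 1 := hkk ▸ pvScanDn_le del (i - 1)
  have hskip : pvScanUp n del (kk + 1) = pvScanUp n del i := by
    apply pvScanUp_skip n del (kk + 1) i (by omega)
    intro j' h1 h2
    have hd := pvScanDn_deleted del (i - 1) j' (by omega) (by omega)
    exact ⟨by omega, hd.2⟩
  rw [hskip, pvScanUp, hlive]
  simp

theorem pvDn_of_up (n : Int) (del : List Bool) (i kk : Int) (hi0 : 0 ≤ i)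
    (hlive : del.getD i.toNat false = false) (hkk : pvScanUp n del (i + 1) = kk) :
    pvScanDn del (kk - 1) = i := by
  have hge : i + 1 ≤ kk := hkk ▸ pvScanUp_ge n del (i + 1)
  have hskip : pvScanDn del (kk - 1) = pvScanDn del i := by
    apply pvScanDn_skip del i (kk - 1) (by omega) (by omega)
    intro j' h1 h2
    have hd := pvScanUp_deleted n del (i + 1) j' (by omega) (by omega)
    exact hd.2
  rw [hskip, pvScanDn, hlive]
  simp

-- the initial table --------------------------------------------------------

theorem pvBuildTable_getD_aux (N : Nat) (i : Int) (hi0 : 0 ≤ i) (hiN : i < (N : Int)) :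
    ((PySem.List.pyRange 0 (N : Int) 1).foldl (fun d x => d.insert x (x - 1, x + 1))
      PySem.Dict.empty).getD i (0, 0) = (i - 1, i + 1) := by
  induction N with
  | zero => omega
  | succ m ih =>
    have hsplit : PySem.List.pyRange 0 ((m + 1 : Nat) : Int) 1 =
        PySem.List.pyRange 0 (m : Int) 1 ++ [(m : Int)] := by
      have : ((m + 1 : Nat) : Int) = (m : Int) + 1 := by push_cast; ring
      rw [this]
      exact PySem.List.pyRange_one_succ_right (by omega)
    rw [hsplit, List.foldl_append]
    simp only [List.foldl_cons, List.foldl_nil]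
    by_cases he : i = (m : Int)
    · subst he
      rw [PySem.Dict.getD_insert_self]
    · rw [PySem.Dict.getD_insert_of_ne _ _ _ he]
      exact ih (by omega)

theorem pvBuildTable_getD (n : Int) (i : Int) (hi0 : 0 ≤ i) (hin : i < n) :
    (pvBuildTable n).getD i (0, 0) = (i - 1, i + 1) := by
  unfold pvBuildTable
  have hn : n = (n.toNat : Int) := by omega
  rw [hn]
  exact pvBuildTable_getD_aux n.toNat i hi0 (by omega)

-- pop from the end ----------------------------------------------------------

theorem pv_pop_last {α : Type} (xs : List α) (ys : List α) (x : α) (h : xs = ys ++ [x]) :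
    PySem.List.pop? xs (-1) = some (x, ys) := by
  subst h
  exact PySem.List.pop?_last ys x

-- The simulation invariant --------------------------------------------------

def pvTblInv (n : Int) (del : List Bool) (table : PySem.Dict Int (Int × Int)) : Prop :=
  ∀ i : Int, 0 ≤ i → i < n → del.getD i.toNat false = false →
    table.getD i (0, 0) = (pvScanDn del (i - 1), pvScanUp n del (i + 1))

def pvStkInv (n : Int) : List Bool → List (Int × Int × Int) → List Int → Prop
  | _, [], [] => True
  | del, (b, a, num) :: cs, m :: ms =>
      num = m ∧ 0 ≤ num ∧ num < n ∧ del.getD num.toNat false = true ∧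
      b = pvScanDn del (num - 1) ∧ a = pvScanUp n del (num + 1) ∧
      pvStkInv n (del.set num.toNat false) cs ms
  | _, _, _ => False

def pvStaleInv (table : PySem.Dict Int (Int × Int)) (clear : List (Int × Int × Int)) : Prop :=
  ∀ e ∈ clear, table.getD e.2.2 (0, 0) = (e.1, e.2.1)

def pvInv (n : Int) (stA : PySem.Dict Int (Int × Int) × List String × List (Int × Int × Int) × Int)
    (stB : List Bool × List Int × Int) : Prop :=
  stA.2.2.2 = stB.2.2 ∧ stA.2.1 = stB.1.map pvFlag ∧ ((stB.1.length : Int) = max n 0) ∧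
  (∀ jn : Nat, stB.1.getD jn false = true ↔ (jn : Int) ∈ stB.2.1) ∧
  pvTblInv n stB.1 stA.1 ∧ pvStkInv n stB.1 stA.2.2.1.reverse stB.2.1.reverse ∧
  pvStaleInv stA.1 stA.2.2.1

theorem pvStkInv_deleted (n : Int) : ∀ (cs : List (Int × Int × Int)) (del : List Bool)
    (ms : List Int), pvStkInv n del cs ms →
    ∀ e ∈ cs, 0 ≤ e.2.2 ∧ e.2.2 < n ∧ del.getD e.2.2.toNat false = true := by
  intro cs
  induction cs with
  | nil => intro del ms _ e he; cases he
  | cons hd tl ih =>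
    obtain ⟨b, a, num⟩ := hd
    intro del ms hS e he
    rw [List.mem_cons] at he
    cases ms with
    | nil => exact absurd hS (by simp [pvStkInv])
    | cons m ms' =>
      obtain ⟨_, h0, hn, hdel, _, _, htl⟩ := hS
      rcases he with he | he
      · subst he; exact ⟨h0, hn, hdel⟩
      · have := ih (del.set num.toNat false) ms' htl e he
        refine ⟨this.1, this.2.1, ?_⟩
        have h3 := this.2.2
        rw [pv_getD_set] at h3
        by_cases hc : e.2.2.toNat = num.toNat ∧ num.toNat < del.length
        · simp [hc] at h3
        · simpa [hc] using h3

-- correspondence between downward and upward skip-scans ----------------------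

theorem pv_dn_up_iff (n : Int) (del : List Bool) (i k : Int) (hi0 : 0 ≤ i) (hin : i < n)
    (hilive : del.getD i.toNat false = false) (hk0 : 0 ≤ k)
    (hklive : del.getD k.toNat false = false) :
    pvScanDn del (i - 1) = k ↔ pvScanUp n del (k + 1) = i := by
  constructor
  · intro h; exact pvUp_of_dn n del i k hi0 hin hilive h hk0
  · intro h; exact pvDn_of_up n del k i hk0 hklive h

-- conditions under which restoring num changes the scans (Z command)
theorem pv_dnZ_iff (n : Int) (del : List Bool) (i num : Int) (hi0 : 0 ≤ i) (hin : i < n)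
    (hilive : del.getD i.toNat false = false) (hn0 : 0 ≤ num) (hnn : num < n)
    (hndel : del.getD num.toNat false = true) :
    (pvScanDn del (i - 1) < num ∧ num ≤ i - 1) ↔ pvScanUp n del (num + 1) = i := by
  constructor
  · rintro ⟨hc1, hc2⟩
    have hskip : pvScanUp n del (num + 1) = pvScanUp n del i := by
      apply pvScanUp_skip n del (num + 1) i (by omega)
      intro j' hj1 hj2
      have := pvScanDn_deleted del (i - 1) j' (by omega) (by omega)
      exact ⟨by omega, this.2⟩
    rw [hskip, pvScanUp, hilive]
    simp
  · intro h
    have hge : num + 1 ≤ i := h ▸ pvScanUp_ge n del (num + 1)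
    constructor
    · have hskip : pvScanDn del (i - 1) = pvScanDn del (num - 1) := by
        apply pvScanDn_skip del (num - 1) (i - 1) (by omega) (by omega)
        intro j' hj1 hj2
        by_cases he : j' = num
        · subst he; exact hndel
        · exact (pvScanUp_deleted n del (num + 1) j' (by omega) (by omega)).2
      rw [hskip]
      have := pvScanDn_le del (num - 1)
      omega
    · omega

theorem pv_upZ_iff (n : Int) (del : List Bool) (i num : Int) (hi0 : 0 ≤ i) (hin : i < n)
    (hilive : del.getD i.toNat false = false) (hn0 : 0 ≤ num) (hnn : num < n)
    (hndel : del.getD num.toNat false = true) :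
    (i + 1 ≤ num ∧ num < pvScanUp n del (i + 1)) ↔ pvScanDn del (num - 1) = i := by
  constructor
  · rintro ⟨hc1, hc2⟩
    have hskip : pvScanDn del (num - 1) = pvScanDn del i := by
      apply pvScanDn_skip del i (num - 1) (by omega) (by omega)
      intro j' hj1 hj2
      exact (pvScanUp_deleted n del (i + 1) j' (by omega) (by omega)).2
    rw [hskip, pvScanDn, hilive]
    simp [hi0]
  · intro h
    have hle : i ≤ num - 1 := h ▸ pvScanDn_le del (num - 1)
    refine ⟨by omega, ?_⟩
    have hskip : pvScanUp n del (i + 1) = pvScanUp n del (num + 1) := by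
      apply pvScanUp_skip n del (i + 1) (num + 1) (by omega)
      intro j' hj1 hj2
      by_cases he : j' = num
      · subst he; exact ⟨hnn, hndel⟩
      · refine ⟨by omega, (pvScanDn_deleted del (num - 1) j' (by omega) (by omega)).2⟩
    have := pvScanUp_ge n del (num + 1)
    rw [hskip]
    omega

-- hop correspondence ---------------------------------------------------------

theorem pv_getD_oob (l : List Bool) (j : Nat) (h : l.length ≤ j) : l.getD j false = false := by
  simp [List.getD_eq_getElem?_getD, List.getElem?_eq_none (by omega)]

theorem pv_filter_mono_le (l : List Int) (j : Int) :
    (l.filter (fun d => decide (d ≤ j - 1))).length ≤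
      (l.filter (fun d => decide (d ≤ j))).length := by
  induction l with
  | nil => exact Nat.le_refl _
  | cons d tl ih =>
    rw [List.filter_cons, List.filter_cons]
    by_cases h1 : d ≤ j - 1
    · rw [if_pos (decide_eq_true h1), if_pos (decide_eq_true (show d ≤ j by omega))]
      simp only [List.length_cons]
      omega
    · rw [if_neg (by simp only [decide_eq_true_eq]; exact h1)]
      by_cases h2 : d ≤ j
      · rw [if_pos (decide_eq_true h2)]
        simp only [List.length_cons]
        omega
      · rw [if_neg (by simp only [decide_eq_true_eq]; exact h2)]
        exact ih

theorem pv_filter_strict_le (l : List Int) (j : Int) (hj : j ∈ l) (hnd : l.Nodup) :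
    (l.filter (fun d => decide (d ≤ j - 1))).length + 1 ≤
      (l.filter (fun d => decide (d ≤ j))).length := by
  induction l with
  | nil => cases hj
  | cons d tl ih =>
    rw [List.nodup_cons] at hnd
    rw [List.filter_cons, List.filter_cons]
    rcases List.mem_cons.mp hj with he | he
    · subst he
      rw [if_pos (decide_eq_true (show j ≤ j by omega)),
        if_neg (by simp only [decide_eq_true_eq]; omega)]
      have := pv_filter_mono_le tl j
      simp only [List.length_cons]
      omega
    · have hdj : d ≠ j := fun h => hnd.1 (h ▸ he)
      by_cases h1 : d ≤ j - 1
      · rw [if_pos (decide_eq_true h1), if_pos (decide_eq_true (show d ≤ j by omega))]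
        have := ih he hnd.2
        simp only [List.length_cons]
        omega
      · rw [if_neg (by simp only [decide_eq_true_eq]; exact h1),
          if_neg (by simp only [decide_eq_true_eq]; omega)]
        exact ih he hnd.2

theorem pv_filter_mono_ge (l : List Int) (j : Int) :
    (l.filter (fun d => decide (j + 1 ≤ d))).length ≤
      (l.filter (fun d => decide (j ≤ d))).length := by
  induction l with
  | nil => exact Nat.le_refl _
  | cons d tl ih =>
    rw [List.filter_cons, List.filter_cons]
    by_cases h1 : j + 1 ≤ d
    · rw [if_pos (decide_eq_true h1), if_pos (decide_eq_true (show j ≤ d by omega))]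
      simp only [List.length_cons]
      omega
    · rw [if_neg (by simp only [decide_eq_true_eq]; exact h1)]
      by_cases h2 : j ≤ d
      · rw [if_pos (decide_eq_true h2)]
        simp only [List.length_cons]
        omega
      · rw [if_neg (by simp only [decide_eq_true_eq]; exact h2)]
        exact ih

theorem pv_filter_strict_ge (l : List Int) (j : Int) (hj : j ∈ l) (hnd : l.Nodup) :
    (l.filter (fun d => decide (j + 1 ≤ d))).length + 1 ≤
      (l.filter (fun d => decide (j ≤ d))).length := by
  induction l with
  | nil => cases hj
  | cons d tl ih =>
    rw [List.nodup_cons] at hnd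
    rw [List.filter_cons, List.filter_cons]
    rcases List.mem_cons.mp hj with he | he
    · subst he
      rw [if_pos (decide_eq_true (show j ≤ j by omega)),
        if_neg (by simp only [decide_eq_true_eq]; omega)]
      have := pv_filter_mono_ge tl j
      simp only [List.length_cons]
      omega
    · have hdj : d ≠ j := fun h => hnd.1 (h ▸ he)
      by_cases h1 : j + 1 ≤ d
      · rw [if_pos (decide_eq_true h1), if_pos (decide_eq_true (show j ≤ d by omega))]
        have := ih he hnd.2
        simp only [List.length_cons]
        omega
      · rw [if_neg (by simp only [decide_eq_true_eq]; exact h1),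
          if_neg (by simp only [decide_eq_true_eq]; omega)]
        exact ih he hnd.2

theorem pvScanDnGo_eq (stk : List Int) (del : List Bool)
    (hMem : ∀ jn : Nat, del.getD jn false = true ↔ (jn : Int) ∈ stk)
    (hnd : stk.Nodup) : ∀ (fuel : Nat) (j : Int),
    (stk.filter (fun d => decide (d ≤ j))).length + 1 ≤ fuel →
    pvScanDnGo stk fuel j = pvScanDn del j := by
  intro fuel
  induction fuel with
  | zero => intro j h; omega
  | succ m ih =>
    intro j h
    rw [pvScanDnGo]
    conv_rhs => rw [pvScanDn]
    by_cases hc : 0 ≤ j ∧ j ∈ stk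
    · have hg : del.getD j.toNat false = true := by
        rw [hMem j.toNat, Int.toNat_of_nonneg hc.1]
        exact hc.2
      rw [if_pos hc, if_pos ⟨hc.1, hg⟩]
      apply ih
      have := pv_filter_strict_le stk j hc.2 hnd
      omega
    · have hg : ¬ (0 ≤ j ∧ del.getD j.toNat false = true) := by
        rintro ⟨h0, hgd⟩
        apply hc
        refine ⟨h0, ?_⟩
        have := (hMem j.toNat).mp hgd
        rwa [Int.toNat_of_nonneg h0] at this
      rw [if_neg hc, if_neg hg]

theorem pvScanDnE_eq (stk : List Int) (del : List Bool)
    (hMem : ∀ jn : Nat, del.getD jn false = true ↔ (jn : Int) ∈ stk)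
    (hnd : stk.Nodup) (j : Int) : pvScanDnE stk j = pvScanDn del j := by
  apply pvScanDnGo_eq stk del hMem hnd
  have := List.length_filter_le (fun d => decide (d ≤ j)) stk
  omega

theorem pvScanUpGo_eq (n : Int) (stk : List Int) (del : List Bool)
    (hMem : ∀ jn : Nat, del.getD jn false = true ↔ (jn : Int) ∈ stk)
    (hnd : stk.Nodup) : ∀ (fuel : Nat) (j : Int), 0 ≤ j →
    (stk.filter (fun d => decide (j ≤ d))).length + 1 ≤ fuel →
    pvScanUpGo n stk fuel j = pvScanUp n del j := by
  intro fuel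
  induction fuel with
  | zero => intro j _ h; omega
  | succ m ih =>
    intro j hj h
    rw [pvScanUpGo]
    conv_rhs => rw [pvScanUp]
    by_cases hc : j < n ∧ j ∈ stk
    · have hg : del.getD j.toNat false = true := by
        rw [hMem j.toNat, Int.toNat_of_nonneg hj]
        exact hc.2
      rw [if_pos hc, if_pos ⟨hc.1, hg⟩]
      apply ih (j + 1) (by omega)
      have := pv_filter_strict_ge stk j hc.2 hnd
      omega
    · have hg : ¬ (j < n ∧ del.getD j.toNat false = true) := by
        rintro ⟨h0, hgd⟩
        apply hc
        refine ⟨h0, ?_⟩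
        have := (hMem j.toNat).mp hgd
        rwa [Int.toNat_of_nonneg hj] at this
      rw [if_neg hc, if_neg hg]

theorem pvScanUpE_eq (n : Int) (stk : List Int) (del : List Bool)
    (hMem : ∀ jn : Nat, del.getD jn false = true ↔ (jn : Int) ∈ stk)
    (hnd : stk.Nodup) (j : Int) (hj : 0 ≤ j) : pvScanUpE n stk j = pvScanUp n del j := by
  apply pvScanUpGo_eq n stk del hMem hnd _ j hj
  have := List.length_filter_le (fun d => decide (j ≤ d)) stk
  omega

theorem pv_notmem_getD (stk : List Int) (del : List Bool)
    (hMem : ∀ jn : Nat, del.getD jn false = true ↔ (jn : Int) ∈ stk)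
    (k : Int) (hk : 0 ≤ k) (h : k ∉ stk) : del.getD k.toNat false = false := by
  by_contra hx
  apply h
  have hx' : del.getD k.toNat false = true := by
    cases hgd : del.getD k.toNat false
    · exact absurd hgd hx
    · rfl
  have := (hMem k.toNat).mp hx'
  rwa [Int.toNat_of_nonneg hk] at this

theorem pvStkInv_ms_eq (n : Int) : ∀ (cs : List (Int × Int × Int)) (del : List Bool)
    (ms : List Int), pvStkInv n del cs ms → ms = cs.map (·.2.2) := by
  intro cs
  induction cs with
  | nil =>
    intro del ms h
    cases ms with
    | nil => rfl
    | cons m ms' => exact absurd h (by simp [pvStkInv])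
  | cons hd tl ih =>
    obtain ⟨b, a, num⟩ := hd
    intro del ms h
    cases ms with
    | nil => exact absurd h (by simp [pvStkInv])
    | cons m ms' =>
      obtain ⟨hnum, _, _, _, _, _, htl⟩ := h
      simp only [List.map_cons]
      rw [ih (del.set num.toNat false) ms' htl, hnum]

theorem pvStkInv_nodup (n : Int) : ∀ (cs : List (Int × Int × Int)) (del : List Bool)
    (ms : List Int), pvStkInv n del cs ms → ms.Nodup := by
  intro cs
  induction cs with
  | nil =>
    intro del ms h
    cases ms with
    | nil => exact List.nodup_nil
    | cons m ms' => exact absurd h (by simp [pvStkInv])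
  | cons hd tl ih =>
    obtain ⟨b, a, num⟩ := hd
    intro del ms h
    cases ms with
    | nil => exact absurd h (by simp [pvStkInv])
    | cons m ms' =>
      obtain ⟨hnum, h0, hn, hdel, _, _, htl⟩ := h
      subst hnum
      rw [List.nodup_cons]
      refine ⟨?_, ih _ _ htl⟩
      intro hmem
      rw [pvStkInv_ms_eq n tl (del.set num.toNat false) ms' htl] at hmem
      obtain ⟨e, he, hee⟩ := List.mem_map.mp hmem
      have := (pvStkInv_deleted n tl (del.set num.toNat false) ms' htl e he).2.2
      rw [hee, pv_getD_set] at this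
      by_cases hc : num.toNat = num.toNat ∧ num.toNat < del.length
      · simp [hc] at this
      · rw [if_neg hc] at this
        have hge : del.length ≤ num.toNat := by
          rcases not_and_or.mp hc with h | h
          · exact absurd rfl h
          · omega
        rw [pv_getD_oob del num.toNat hge] at this
        simp at this

theorem pvChkUGo_hop (n : Int) (table : PySem.Dict Int (Int × Int)) (del : List Bool)
    (stk : List Int) (hT : pvTblInv n del table)
    (hMem : ∀ jn : Nat, del.getD jn false = true ↔ (jn : Int) ∈ stk)
    (hnd : stk.Nodup) : ∀ (fuel : Nat) (x k k' : Int), x.toNat = fuel →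
    pvChkUGo n stk fuel k = some k' → pvHopU table x k = k' ∧ pvRepU del x k = k' := by
  intro fuel
  induction fuel with
  | zero =>
    intro x k k' hx h
    rw [pvChkUGo] at h
    simp only [Option.some.injEq] at h
    subst h
    exact ⟨by rw [pvHopU, if_neg (by omega)], by rw [pvRepU, if_neg (by omega)]⟩
  | succ m ih =>
    intro x k k' hx h
    rw [pvChkUGo] at h
    split at h
    · rename_i hc
      rw [pvScanDnE_eq stk del hMem hnd] at h
      have hlive : del.getD k.toNat false = false :=
        pv_notmem_getD stk del hMem k hc.1 hc.2.2
      have htk : table.getD k (0, 0) = (pvScanDn del (k - 1), pvScanUp n del (k + 1)) :=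
        hT k hc.1 hc.2.1 hlive
      have := ih (x - 1) (pvScanDn del (k - 1)) k' (by omega) h
      constructor
      · rw [pvHopU, if_pos (by omega), htk]
        exact this.1
      · rw [pvRepU, if_pos (by omega)]
        exact this.2
    · exact absurd h (by simp)

theorem pvChkU_hop (n : Int) (table : PySem.Dict Int (Int × Int)) (del : List Bool)
    (stk : List Int) (hT : pvTblInv n del table)
    (hMem : ∀ jn : Nat, del.getD jn false = true ↔ (jn : Int) ∈ stk)
    (hnd : stk.Nodup) (x k k' : Int) (h : pvChkU n stk x k = some k') :
    pvHopU table x k = k' ∧ pvRepU del x k = k' :=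
  pvChkUGo_hop n table del stk hT hMem hnd x.toNat x k k' rfl h

theorem pvChkDGo_hop (n : Int) (table : PySem.Dict Int (Int × Int)) (del : List Bool)
    (stk : List Int) (hT : pvTblInv n del table)
    (hMem : ∀ jn : Nat, del.getD jn false = true ↔ (jn : Int) ∈ stk)
    (hnd : stk.Nodup) : ∀ (fuel : Nat) (x k k' : Int), x.toNat = fuel →
    pvChkDGo n stk fuel k = some k' → pvHopD table x k = k' ∧ pvRepD n del x k = k' := by
  intro fuel
  induction fuel with
  | zero =>
    intro x k k' hx h
    rw [pvChkDGo] at h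
    simp only [Option.some.injEq] at h
    subst h
    exact ⟨by rw [pvHopD, if_neg (by omega)], by rw [pvRepD, if_neg (by omega)]⟩
  | succ m ih =>
    intro x k k' hx h
    rw [pvChkDGo] at h
    split at h
    · rename_i hc
      rw [pvScanUpE_eq n stk del hMem hnd _ (by omega)] at h
      have hlive : del.getD k.toNat false = false :=
        pv_notmem_getD stk del hMem k hc.1 hc.2.2
      have htk : table.getD k (0, 0) = (pvScanDn del (k - 1), pvScanUp n del (k + 1)) :=
        hT k hc.1 hc.2.1 hlive
      have := ih (x - 1) (pvScanUp n del (k + 1)) k' (by omega) h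
      constructor
      · rw [pvHopD, if_pos (by omega), htk]
        exact this.1
      · rw [pvRepD, if_pos (by omega)]
        exact this.2
    · exact absurd h (by simp)

theorem pvChkD_hop (n : Int) (table : PySem.Dict Int (Int × Int)) (del : List Bool)
    (stk : List Int) (hT : pvTblInv n del table)
    (hMem : ∀ jn : Nat, del.getD jn false = true ↔ (jn : Int) ∈ stk)
    (hnd : stk.Nodup) (x k k' : Int) (h : pvChkD n stk x k = some k') :
    pvHopD table x k = k' ∧ pvRepD n del x k = k' :=
  pvChkDGo_hop n table del stk hT hMem hnd x.toNat x k k' rfl h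

theorem pv_getD_set_ne (l : List Bool) (i kk : Int) (v : Bool) (hi0 : 0 ≤ i) (hk0 : 0 ≤ kk)
    (hne : i ≠ kk) : (l.set kk.toNat v).getD i.toNat false = l.getD i.toNat false := by
  rw [pv_getD_set]
  have : ¬ (i.toNat = kk.toNat ∧ kk.toNat < l.length) := by
    rintro ⟨h1, _⟩; omega
  simp [this]

theorem pvC_scans (n : Int) (del : List Bool) (kB i : Int)
    (hk0 : 0 ≤ kB) (hkn : kB < n) (hkNat : kB.toNat < del.length)
    (hklive : del.getD kB.toNat false = false)
    (hi0 : 0 ≤ i) (hin : i < n) (hlive : del.getD i.toNat false = false) (hne : i ≠ kB) :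
    pvScanDn (del.set kB.toNat true) (i - 1) =
      (if i = pvScanUp n del (kB + 1) then pvScanDn del (kB - 1) else pvScanDn del (i - 1)) ∧
    pvScanUp n (del.set kB.toNat true) (i + 1) =
      (if i = pvScanDn del (kB - 1) then pvScanUp n del (kB + 1) else pvScanUp n del (i + 1)) := by
  constructor
  · rw [pvScanDn_set_true del kB (i - 1) hk0 hkNat hklive]
    by_cases hc : pvScanDn del (i - 1) = kB
    · have hup := (pv_dn_up_iff n del i kB hi0 hin hlive hk0 hklive).mp hc
      rw [if_pos hc, if_pos hup.symm]
    · have hnc : ¬ (i = pvScanUp n del (kB + 1)) := fun h =>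
        hc ((pv_dn_up_iff n del i kB hi0 hin hlive hk0 hklive).mpr h.symm)
      rw [if_neg hc, if_neg hnc]
  · rw [pvScanUp_set_true n del kB (i + 1) hk0 hkn hkNat hklive (by omega)]
    by_cases hc : pvScanUp n del (i + 1) = kB
    · have hdn := (pv_dn_up_iff n del kB i hk0 hkn hklive hi0 hlive).mpr hc
      rw [if_pos hc, if_pos hdn.symm]
    · have hnc : ¬ (i = pvScanDn del (kB - 1)) := fun h =>
        hc ((pv_dn_up_iff n del kB i hk0 hkn hklive hi0 hlive).mp h.symm)
      rw [if_neg hc, if_neg hnc]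

theorem pvC_tbl (n : Int) (del : List Bool) (table : PySem.Dict Int (Int × Int)) (kB : Int)
    (hlen : (del.length : Int) = max n 0) (hT : pvTblInv n del table)
    (hk0 : 0 ≤ kB) (hkn : kB < n) (hklive : del.getD kB.toNat false = false)
    (hnot : ¬(pvScanDn del (kB - 1) = -1 ∧ pvScanUp n del (kB + 1) = n)) :
    pvTblInv n (del.set kB.toNat true)
      (if pvScanDn del (kB - 1) = -1 then
        table.modify (pvScanUp n del (kB + 1)) (0, 0) (fun p => (pvScanDn del (kB - 1), p.2))
      else if pvScanUp n del (kB + 1) = n then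
        table.modify (pvScanDn del (kB - 1)) (0, 0) (fun p => (p.1, pvScanUp n del (kB + 1)))
      else
        (table.modify (pvScanDn del (kB - 1)) (0, 0)
          (fun p => (p.1, pvScanUp n del (kB + 1)))).modify (pvScanUp n del (kB + 1)) (0, 0)
          (fun p => (pvScanDn del (kB - 1), p.2))) := by
  have hkNat : kB.toNat < del.length := by omega
  have hB0le := pvScanDn_le del (kB - 1)
  have hB0ge := pvScanDn_ge del (kB - 1) (by omega)
  have hB0stop := pvScanDn_stop del (kB - 1)
  have hA0ge := pvScanUp_ge n del (kB + 1)
  have hA0le := pvScanUp_le n del (kB + 1) (by omega)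
  have hA0stop := pvScanUp_stop n del (kB + 1)
  intro i hi0 hin hlive'
  have hne : i ≠ kB := by
    intro h
    subst h
    rw [pv_getD_set] at hlive'
    simp [hkNat] at hlive'
  have hlive : del.getD i.toNat false = false := by
    rw [pv_getD_set_ne del i kB true hi0 hk0 hne] at hlive'
    exact hlive'
  have hsc := pvC_scans n del kB i hk0 hkn hkNat hklive hi0 hin hlive hne
  by_cases hb : pvScanDn del (kB - 1) = -1
  · rw [if_pos hb]
    have hAn : pvScanUp n del (kB + 1) < n := by
      have : pvScanUp n del (kB + 1) ≠ n := fun h => hnot ⟨hb, h⟩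
      omega
    have hAlive : del.getD (pvScanUp n del (kB + 1)).toNat false = false := by
      rcases hA0stop with h | h
      · omega
      · exact h
    have hTA := hT (pvScanUp n del (kB + 1)) (by omega) hAn hAlive
    by_cases hia : i = pvScanUp n del (kB + 1)
    · subst hia
      have hiB : pvScanUp n del (kB + 1) ≠ pvScanDn del (kB - 1) := by omega
      simp [PySem.Dict.getD_modify, hTA, hsc.1, hsc.2, hiB]
    · have hTi := hT i hi0 hin hlive
      have hiB : i ≠ pvScanDn del (kB - 1) := by omega
      simp [PySem.Dict.getD_modify, hia, hTi, hsc.1, hsc.2, hiB]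
  · by_cases ha : pvScanUp n del (kB + 1) = n
    · rw [if_neg hb, if_pos ha]
      have hB0 : 0 ≤ pvScanDn del (kB - 1) := by omega
      have hBlive : del.getD (pvScanDn del (kB - 1)).toNat false = false := by
        rcases hB0stop with h | h
        · omega
        · exact h
      have hTB := hT (pvScanDn del (kB - 1)) hB0 (by omega) hBlive
      have hiA : i ≠ pvScanUp n del (kB + 1) := by omega
      by_cases hib : i = pvScanDn del (kB - 1)
      · subst hib
        simp [PySem.Dict.getD_modify, hTB, hsc.1, hsc.2, hiA]
      · have hTi := hT i hi0 hin hlive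
        simp [PySem.Dict.getD_modify, hib, hTi, hsc.1, hsc.2, hiA]
    · rw [if_neg hb, if_neg ha]
      have hAn : pvScanUp n del (kB + 1) < n := by omega
      have hB0 : 0 ≤ pvScanDn del (kB - 1) := by omega
      have hAlive : del.getD (pvScanUp n del (kB + 1)).toNat false = false := by
        rcases hA0stop with h | h
        · omega
        · exact h
      have hBlive : del.getD (pvScanDn del (kB - 1)).toNat false = false := by
        rcases hB0stop with h | h
        · omega
        · exact h
      have hTA := hT (pvScanUp n del (kB + 1)) (by omega) hAn hAlive
      have hTB := hT (pvScanDn del (kB - 1)) hB0 (by omega) hBlive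
      have hAB : pvScanUp n del (kB + 1) ≠ pvScanDn del (kB - 1) := by omega
      have hBA : pvScanDn del (kB - 1) ≠ pvScanUp n del (kB + 1) := by omega
      by_cases hia : i = pvScanUp n del (kB + 1)
      · subst hia
        simp [PySem.Dict.getD_modify, hTA, hsc.1, hsc.2, hAB]
      · by_cases hib : i = pvScanDn del (kB - 1)
        · subst hib
          simp [PySem.Dict.getD_modify, hTB, hsc.1, hsc.2, hBA]
        · have hTi := hT i hi0 hin hlive
          simp [PySem.Dict.getD_modify, hia, hib, hTi, hsc.1, hsc.2]

theorem pvZ_scans (n : Int) (del : List Bool) (num i : Int)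
    (hn0 : 0 ≤ num) (hnn : num < n) (hnNat : num.toNat < del.length)
    (hndel : del.getD num.toNat false = true)
    (hi0 : 0 ≤ i) (hin : i < n) (hlive : del.getD i.toNat false = false) (hne : i ≠ num) :
    pvScanDn (del.set num.toNat false) (i - 1) =
      (if i = pvScanUp n del (num + 1) then num else pvScanDn del (i - 1)) ∧
    pvScanUp n (del.set num.toNat false) (i + 1) =
      (if i = pvScanDn del (num - 1) then num else pvScanUp n del (i + 1)) := by
  constructor
  · rw [pvScanDn_set_false del num (i - 1) hn0 hnNat hndel]
    by_cases hc : pvScanDn del (i - 1) < num ∧ num ≤ i - 1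
    · have hup := (pv_dnZ_iff n del i num hi0 hin hlive hn0 hnn hndel).mp hc
      rw [if_pos hc, if_pos hup.symm]
    · have hnc : ¬ (i = pvScanUp n del (num + 1)) := fun h =>
        hc ((pv_dnZ_iff n del i num hi0 hin hlive hn0 hnn hndel).mpr h.symm)
      rw [if_neg hc, if_neg hnc]
  · rw [pvScanUp_set_false n del num (i + 1) hn0 hnn hnNat hndel (by omega)]
    by_cases hc : i + 1 ≤ num ∧ num < pvScanUp n del (i + 1)
    · have hdn := (pv_upZ_iff n del i num hi0 hin hlive hn0 hnn hndel).mp hc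
      rw [if_pos hc, if_pos hdn.symm]
    · have hnc : ¬ (i = pvScanDn del (num - 1)) := fun h =>
        hc ((pv_upZ_iff n del i num hi0 hin hlive hn0 hnn hndel).mpr h.symm)
      rw [if_neg hc, if_neg hnc]

theorem pvZ_tbl (n : Int) (del : List Bool) (table : PySem.Dict Int (Int × Int)) (num : Int)
    (hlen : (del.length : Int) = max n 0) (hT : pvTblInv n del table)
    (hn0 : 0 ≤ num) (hnn : num < n) (hndel : del.getD num.toNat false = true)
    (hstale : table.getD num (0, 0) = (pvScanDn del (num - 1), pvScanUp n del (num + 1))) :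
    pvTblInv n (del.set num.toNat false)
      (if pvScanDn del (num - 1) = -1 then
        table.modify (pvScanUp n del (num + 1)) (0, 0) (fun p => (num, p.2))
      else if pvScanUp n del (num + 1) = n then
        table.modify (pvScanDn del (num - 1)) (0, 0) (fun p => (p.1, num))
      else
        (table.modify (pvScanDn del (num - 1)) (0, 0) (fun p => (p.1, num))).modify
          (pvScanUp n del (num + 1)) (0, 0) (fun p => (num, p.2))) := by
  have hnNat : num.toNat < del.length := by omega
  have hB0le := pvScanDn_le del (num - 1)
  have hB0ge := pvScanDn_ge del (num - 1) (by omega)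
  have hB0stop := pvScanDn_stop del (num - 1)
  have hA0ge := pvScanUp_ge n del (num + 1)
  have hA0le := pvScanUp_le n del (num + 1) (by omega)
  have hA0stop := pvScanUp_stop n del (num + 1)
  have hdnum : pvScanDn (del.set num.toNat false) (num - 1) = pvScanDn del (num - 1) :=
    pvScanDn_set_out del num (num - 1) false hn0 (by omega)
  have hunum : pvScanUp n (del.set num.toNat false) (num + 1) = pvScanUp n del (num + 1) :=
    pvScanUp_set_out n del num (num + 1) false hn0 (by omega)
  have hnumA : num ≠ pvScanUp n del (num + 1) := by omega
  have hnumB : num ≠ pvScanDn del (num - 1) := by omega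
  intro i hi0 hin hlive'
  by_cases hne : i = num
  · -- the restored row: its stale table entry is exactly its stored neighbours
    subst hne
    rw [hdnum, hunum]
    by_cases hb : pvScanDn del (i - 1) = -1
    · rw [if_pos hb]
      simp [PySem.Dict.getD_modify, hnumA, hstale]
    · by_cases ha : pvScanUp n del (i + 1) = n
      · rw [if_neg hb, if_pos ha]
        simp [PySem.Dict.getD_modify, hnumB, hstale]
      · rw [if_neg hb, if_neg ha]
        simp [PySem.Dict.getD_modify, hnumA, hnumB, hstale]
  · have hlive : del.getD i.toNat false = false := by
      rw [pv_getD_set_ne del i num false hi0 hn0 hne] at hlive'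
      exact hlive'
    have hsc := pvZ_scans n del num i hn0 hnn hnNat hndel hi0 hin hlive hne
    by_cases hb : pvScanDn del (num - 1) = -1
    · rw [if_pos hb]
      by_cases hia : i = pvScanUp n del (num + 1)
      · have hAn : pvScanUp n del (num + 1) < n := by omega
        have hAlive : del.getD (pvScanUp n del (num + 1)).toNat false = false := by
          rcases hA0stop with h | h
          · omega
          · exact h
        have hTA := hT (pvScanUp n del (num + 1)) (by omega) hAn hAlive
        have hAB : pvScanUp n del (num + 1) ≠ pvScanDn del (num - 1) := by omega
        subst hia
        simp [PySem.Dict.getD_modify, hTA, hsc.1, hsc.2, hAB]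
      · have hTi := hT i hi0 hin hlive
        have hiB : i ≠ pvScanDn del (num - 1) := by omega
        simp [PySem.Dict.getD_modify, hia, hTi, hsc.1, hsc.2, hiB]
    · by_cases ha : pvScanUp n del (num + 1) = n
      · rw [if_neg hb, if_pos ha]
        have hB0 : 0 ≤ pvScanDn del (num - 1) := by omega
        have hBlive : del.getD (pvScanDn del (num - 1)).toNat false = false := by
          rcases hB0stop with h | h
          · omega
          · exact h
        have hTB := hT (pvScanDn del (num - 1)) hB0 (by omega) hBlive
        have hiA : i ≠ pvScanUp n del (num + 1) := by omega
        by_cases hib : i = pvScanDn del (num - 1)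
        · subst hib
          simp [PySem.Dict.getD_modify, hTB, hsc.1, hsc.2, hiA]
        · have hTi := hT i hi0 hin hlive
          simp [PySem.Dict.getD_modify, hib, hTi, hsc.1, hsc.2, hiA]
      · rw [if_neg hb, if_neg ha]
        have hAn : pvScanUp n del (num + 1) < n := by omega
        have hB0 : 0 ≤ pvScanDn del (num - 1) := by omega
        have hAlive : del.getD (pvScanUp n del (num + 1)).toNat false = false := by
          rcases hA0stop with h | h
          · omega
          · exact h
        have hBlive : del.getD (pvScanDn del (num - 1)).toNat false = false := by
          rcases hB0stop with h | h
          · omega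
          · exact h
        have hTA := hT (pvScanUp n del (num + 1)) (by omega) hAn hAlive
        have hTB := hT (pvScanDn del (num - 1)) hB0 (by omega) hBlive
        have hAB : pvScanUp n del (num + 1) ≠ pvScanDn del (num - 1) := by omega
        have hBA : pvScanDn del (num - 1) ≠ pvScanUp n del (num + 1) := by omega
        by_cases hia : i = pvScanUp n del (num + 1)
        · subst hia
          simp [PySem.Dict.getD_modify, hTA, hsc.1, hsc.2, hAB]
        · by_cases hib : i = pvScanDn del (num - 1)
          · subst hib
            simp [PySem.Dict.getD_modify, hTB, hsc.1, hsc.2, hBA]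
          · have hTi := hT i hi0 hin hlive
            simp [PySem.Dict.getD_modify, hia, hib, hTi, hsc.1, hsc.2]

theorem pv_pop_inv {α : Type} (xs ys : List α) (y : α)
    (h : PySem.List.pop? xs (-1) = some (y, ys)) : xs = ys ++ [y] := by
  cases xs with
  | nil => simp [PySem.List.pop?] at h
  | cons z zs =>
    have hne : (z :: zs) ≠ [] := by simp
    conv at h => rw [← List.dropLast_append_getLast hne]
    rw [PySem.List.pop?_last] at h
    injection h with h1
    injection h1 with h1 h2
    subst h1; subst h2
    exact (List.dropLast_append_getLast hne).symm

theorem pv_step (n : Int) (c : String) (table : PySem.Dict Int (Int × Int))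
    (answer : List String) (clear : List (Int × Int × Int)) (del : List Bool)
    (removed : List Int) (kB : Int) (st' : List Int × Int)
    (h2 : answer = del.map pvFlag) (h3 : (del.length : Int) = max n 0)
    (hM : ∀ jn : Nat, del.getD jn false = true ↔ (jn : Int) ∈ removed)
    (h4 : pvTblInv n del table) (h5 : pvStkInv n del clear.reverse removed.reverse)
    (h6 : pvStaleInv table clear)
    (hS : pvSafeStep n (removed, kB) c = some st') :
    ∃ stB' : List Bool × List Int × Int, pvStepB n (del, removed, kB) c = stB' ∧
      pvInv n (pvStepA n (table, answer, clear, kB) c) stB' ∧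
      stB'.2.1 = st'.1 ∧ stB'.2.2 = st'.2 := by
  have hnd : removed.Nodup :=
    List.nodup_reverse.mp (pvStkInv_nodup n clear.reverse del removed.reverse h5)
  simp only [pvSafeStep] at hS
  simp only [pvStepA, pvStepB]
  cases hd : PySem.List.pyGet? (PySem.Str.split₀ c) 0 with
  | none => rw [hd] at hS; exact absurd hS (by simp)
  | some t0 =>
    rw [hd] at hS
    simp only at hS ⊢
    by_cases htC : t0 = "C"
    · rw [if_pos htC] at hS
      rw [if_pos htC, if_pos htC]
      by_cases hcond : 0 ≤ kB ∧ kB < n ∧ kB ∉ removed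
      · rw [if_pos hcond] at hS
        obtain ⟨hk0, hkn, hknm⟩ := hcond
        have hklive : del.getD kB.toNat false = false :=
          pv_notmem_getD removed del hM kB hk0 hknm
        have hkNat : kB.toNat < del.length := by omega
        have hnd' : (removed ++ [kB]).Nodup := by
          simp only [List.nodup_append]
          refine ⟨hnd, by simp, ?_⟩
          intro x hx b hb
          simp only [List.mem_singleton] at hb
          subst hb
          exact fun h => hknm (h ▸ hx)
        have hMem' : ∀ jn : Nat, (del.set kB.toNat true).getD jn false = true ↔
            (jn : Int) ∈ removed ++ [kB] := by
          intro jn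
          rw [pv_getD_set]
          by_cases hc : jn = kB.toNat ∧ kB.toNat < del.length
          · rw [if_pos hc]
            have hjn : (jn : Int) = kB := by omega
            simp [hjn]
          · rw [if_neg hc]
            have hjn : (jn : Int) ≠ kB := by
              intro h
              exact hc ⟨by omega, hkNat⟩
            rw [hM jn]
            simp [List.mem_append, hjn]
        have hbout : pvScanDn (del.set kB.toNat true) (kB - 1) = pvScanDn del (kB - 1) :=
          pvScanDn_set_out del kB (kB - 1) true hk0 (by omega)
        have haout : pvScanUp n (del.set kB.toNat true) (kB + 1) = pvScanUp n del (kB + 1) :=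
          pvScanUp_set_out n del kB (kB + 1) true hk0 (by omega)
        have hEa : pvScanUpE n (removed ++ [kB]) (kB + 1) = pvScanUp n del (kB + 1) := by
          rw [pvScanUpE_eq n (removed ++ [kB]) (del.set kB.toNat true) hMem' hnd' _ (by omega)]
          exact haout
        have hEb : pvScanDnE (removed ++ [kB]) (kB - 1) = pvScanDn del (kB - 1) := by
          rw [pvScanDnE_eq (removed ++ [kB]) (del.set kB.toNat true) hMem' hnd']
          exact hbout
        rw [hEa, hEb] at hS
        by_cases hba : pvScanDn del (kB - 1) = -1 ∧ pvScanUp n del (kB + 1) = n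
        · rw [if_pos hba] at hS
          exact absurd hS (by simp)
        · rw [if_neg hba] at hS
          simp only [Option.some.injEq] at hS
          subst hS
          have hTk := h4 kB hk0 hkn hklive
          have hB0le := pvScanDn_le del (kB - 1)
          have hB0ge := pvScanDn_ge del (kB - 1) (by omega)
          have hB0stop := pvScanDn_stop del (kB - 1)
          have hA0ge := pvScanUp_ge n del (kB + 1)
          have hA0le := pvScanUp_le n del (kB + 1) (by omega)
          have hA0stop := pvScanUp_stop n del (kB + 1)
          have htbl := pvC_tbl n del table kB h3 h4 hk0 hkn hklive hba
          have hans : answer.set kB.toNat "X" = (del.set kB.toNat true).map pvFlag := by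
            rw [h2, List.map_set]
            rfl
          have hlen' : (((del.set kB.toNat true).length : Nat) : Int) = max n 0 := by
            simpa [List.length_set] using h3
          have hstk : pvStkInv n (del.set kB.toNat true)
              ((clear ++ [(pvScanDn del (kB - 1), pvScanUp n del (kB + 1), kB)]).reverse)
              ((removed ++ [kB]).reverse) := by
            rw [List.reverse_append, List.reverse_append]
            simp only [List.reverse_cons, List.reverse_nil, List.nil_append,
              List.singleton_append]
            refine ⟨rfl, hk0, hkn, ?_, hbout.symm, haout.symm, ?_⟩
            · rw [pv_getD_set]
              simp [hkNat]
            · rw [List.set_set, pv_set_getD_self del kB.toNat hkNat hklive]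
              exact h5
          have hdelmem := pvStkInv_deleted n clear.reverse del removed.reverse h5
          have hstaleC : ∀ e ∈ clear, e.2.2 ≠ pvScanUp n del (kB + 1) ∧
              e.2.2 ≠ pvScanDn del (kB - 1) ∧ e.2.2 ≠ kB := by
            intro e he
            have hm := hdelmem e (List.mem_reverse.mpr he)
            refine ⟨?_, ?_, ?_⟩
            · intro hx
              rcases hA0stop with h | h
              · omega
              · rw [← hx, hm.2.2] at h
                simp at h
            · intro hx
              rcases hB0stop with h | h
              · omega
              · rw [← hx, hm.2.2] at h
                simp at h
            · intro hx
              rw [hx, hklive] at hm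
              simp at hm
          have hkA : kB ≠ pvScanUp n del (kB + 1) := by omega
          have hkB : kB ≠ pvScanDn del (kB - 1) := by omega
          rw [hTk]
          simp only
          have hBeq : (if pvScanUp n (del.set kB.toNat true) (kB + 1) < n then
              (del.set kB.toNat true, removed ++ [kB],
                pvScanUp n (del.set kB.toNat true) (kB + 1))
            else (del.set kB.toNat true, removed ++ [kB],
                pvScanDn (del.set kB.toNat true) (kB - 1))) =
              (del.set kB.toNat true, removed ++ [kB],
                if pvScanUp n del (kB + 1) < n then pvScanUp n del (kB + 1)
                else pvScanDn del (kB - 1)) := by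
            rw [hbout, haout]
            by_cases hcn : pvScanUp n del (kB + 1) < n
            · rw [if_pos hcn, if_pos hcn]
            · rw [if_neg hcn, if_neg hcn]
          by_cases hb : pvScanDn del (kB - 1) = -1
          · have han : pvScanUp n del (kB + 1) < n := by
              have : pvScanUp n del (kB + 1) ≠ n := fun h => hba ⟨hb, h⟩
              omega
            rw [if_pos hb] at htbl
            rw [if_pos hb]
            refine ⟨_, hBeq, ⟨?_, hans, hlen', hMem', htbl, hstk, ?_⟩, rfl, rfl⟩
            · rw [if_pos han]
            · intro e he
              rw [List.mem_append] at he
              rcases he with he | he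
              · have hz := hstaleC e he
                rw [PySem.Dict.getD_modify, if_neg hz.1]
                exact h6 e he
              · simp only [List.mem_singleton] at he
                subst he
                rw [PySem.Dict.getD_modify, if_neg hkA, hTk]
          · by_cases ha : pvScanUp n del (kB + 1) = n
            · have hb0 : 0 ≤ pvScanDn del (kB - 1) := by omega
              rw [if_neg hb, if_pos ha] at htbl
              rw [if_neg hb, if_pos ha]
              refine ⟨_, hBeq, ⟨?_, hans, hlen', hMem', htbl, hstk, ?_⟩, rfl, rfl⟩
              · rw [if_neg (by omega)]
              · intro e he
                rw [List.mem_append] at he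
                rcases he with he | he
                · have hz := hstaleC e he
                  rw [PySem.Dict.getD_modify, if_neg hz.2.1]
                  exact h6 e he
                · simp only [List.mem_singleton] at he
                  subst he
                  rw [PySem.Dict.getD_modify, if_neg hkB, hTk]
            · have han : pvScanUp n del (kB + 1) < n := by omega
              rw [if_neg hb, if_neg ha] at htbl
              rw [if_neg hb, if_neg ha]
              refine ⟨_, hBeq, ⟨?_, hans, hlen', hMem', htbl, hstk, ?_⟩, rfl, rfl⟩
              · rw [if_pos han]
              · intro e he
                rw [List.mem_append] at he
                rcases he with he | he
                · have hz := hstaleC e he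
                  rw [PySem.Dict.getD_modify, if_neg hz.1, PySem.Dict.getD_modify,
                    if_neg hz.2.1]
                  exact h6 e he
                · simp only [List.mem_singleton] at he
                  subst he
                  rw [PySem.Dict.getD_modify, if_neg hkA, PySem.Dict.getD_modify,
                    if_neg hkB, hTk]
      · rw [if_neg hcond] at hS
        exact absurd hS (by simp)
    · rw [if_neg htC] at hS
      rw [if_neg htC, if_neg htC]
      by_cases htZ : c = "Z"
      · rw [if_pos htZ] at hS
        rw [if_pos htZ, if_pos htZ]
        cases hp : PySem.List.pop? removed (-1) with
        | none => rw [hp] at hS; exact absurd hS (by simp)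
        | some pr =>
          obtain ⟨num, removed'⟩ := pr
          rw [hp] at hS
          simp only [Option.some.injEq] at hS
          subst hS
          have hrem : removed = removed' ++ [num] := pv_pop_inv removed removed' num hp
          cases hcl : clear.reverse with
          | nil =>
            rw [hcl, hrem] at h5
            rw [List.reverse_append] at h5
            simp [pvStkInv] at h5
          | cons top cs =>
            obtain ⟨b, a, num0⟩ := top
            have hclr : clear = cs.reverse ++ [(b, a, num0)] := by
              have := congrArg List.reverse hcl
              simpa using this
            rw [hcl, hrem, List.reverse_append] at h5
            simp only [List.reverse_cons, List.reverse_nil, List.nil_append,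
              List.singleton_append] at h5
            obtain ⟨hnum0, hn0, hnn, hndel, hbdef, hadef, htail⟩ := h5
            subst hnum0
            have hnNat : num0.toNat < del.length := by omega
            have hnotin : num0 ∉ removed' := by
              rw [hrem, List.nodup_append] at hnd
              intro hmem
              exact hnd.2.2 num0 hmem num0 (by simp) rfl
            have hMem'' : ∀ jn : Nat, (del.set num0.toNat false).getD jn false = true ↔
                (jn : Int) ∈ removed' := by
              intro jn
              rw [pv_getD_set]
              by_cases hc : jn = num0.toNat ∧ num0.toNat < del.length
              · rw [if_pos hc]
                have hjn : (jn : Int) = num0 := by omega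
                simp [hjn, hnotin]
              · rw [if_neg hc]
                have hjn : (jn : Int) ≠ num0 := by
                  intro h
                  exact hc ⟨by omega, hnNat⟩
                rw [hM jn, hrem]
                simp [List.mem_append, hjn]
            have hpopA : PySem.List.pop? clear (-1) = some ((b, a, num0), cs.reverse) :=
              pv_pop_last clear cs.reverse (b, a, num0) hclr
            rw [hpopA]
            simp only
            have hmemtop : (b, a, num0) ∈ clear := by rw [hclr]; simp
            have hst : table.getD num0 (0, 0) = (b, a) := by
              have := h6 (b, a, num0) hmemtop
              simpa using this
            have hst' : table.getD num0 (0, 0) =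
                (pvScanDn del (num0 - 1), pvScanUp n del (num0 + 1)) := by
              rw [hst, hbdef, hadef]
            have htbl := pvZ_tbl n del table num0 h3 h4 hn0 hnn hndel hst'
            have hB0le := pvScanDn_le del (num0 - 1)
            have hB0ge := pvScanDn_ge del (num0 - 1) (by omega)
            have hB0stop := pvScanDn_stop del (num0 - 1)
            have hA0ge := pvScanUp_ge n del (num0 + 1)
            have hA0le := pvScanUp_le n del (num0 + 1) (by omega)
            have hA0stop := pvScanUp_stop n del (num0 + 1)
            have hans : answer.set num0.toNat "O" = (del.set num0.toNat false).map pvFlag := by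
              rw [h2, List.map_set]
              rfl
            have hlen' : (((del.set num0.toNat false).length : Nat) : Int) = max n 0 := by
              simpa [List.length_set] using h3
            have hstk : pvStkInv n (del.set num0.toNat false) (cs.reverse).reverse
                removed'.reverse := by
              simpa [List.reverse_reverse] using htail
            have hdelmem := pvStkInv_deleted n cs (del.set num0.toNat false) removed'.reverse htail
            have hstaleZ : ∀ e ∈ cs.reverse,
                e.2.2 ≠ pvScanUp n del (num0 + 1) ∧ e.2.2 ≠ pvScanDn del (num0 - 1) ∧
                  table.getD e.2.2 (0, 0) = (e.1, e.2.1) := by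
              intro e he
              have hm := hdelmem e (List.mem_reverse.mp he)
              have hdelE : del.getD e.2.2.toNat false = true := by
                have h3' := hm.2.2
                rw [pv_getD_set] at h3'
                by_cases hc : e.2.2.toNat = num0.toNat ∧ num0.toNat < del.length
                · simp [hc] at h3'
                · simpa [hc] using h3'
              refine ⟨?_, ?_, h6 e (by rw [hclr]; exact List.mem_append_left _ he)⟩
              · intro hx
                rcases hA0stop with h | h
                · omega
                · rw [← hx] at h
                  rw [hdelE] at h
                  simp at h
              · intro hx
                rcases hB0stop with h | h
                · omega
                · rw [← hx] at h
                  rw [hdelE] at h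
                  simp at h
            rw [hbdef, hadef]
            by_cases hb : pvScanDn del (num0 - 1) = -1
            · rw [if_pos hb] at htbl
              rw [if_pos hb]
              refine ⟨_, rfl, ⟨rfl, hans, hlen', hMem'', htbl, hstk, ?_⟩, rfl, rfl⟩
              intro e he
              have hz := hstaleZ e he
              rw [PySem.Dict.getD_modify, if_neg hz.1]
              exact hz.2.2
            · by_cases ha : pvScanUp n del (num0 + 1) = n
              · rw [if_neg hb, if_pos ha] at htbl
                rw [if_neg hb, if_pos ha]
                refine ⟨_, rfl, ⟨rfl, hans, hlen', hMem'', htbl, hstk, ?_⟩, rfl, rfl⟩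
                intro e he
                have hz := hstaleZ e he
                rw [PySem.Dict.getD_modify, if_neg hz.2.1]
                exact hz.2.2
              · rw [if_neg hb, if_neg ha] at htbl
                rw [if_neg hb, if_neg ha]
                refine ⟨_, rfl, ⟨rfl, hans, hlen', hMem'', htbl, hstk, ?_⟩, rfl, rfl⟩
                intro e he
                have hz := hstaleZ e he
                rw [PySem.Dict.getD_modify, if_neg hz.1, PySem.Dict.getD_modify, if_neg hz.2.1]
                exact hz.2.2
      · rw [if_neg htZ] at hS
        rw [if_neg htZ, if_neg htZ]
        by_cases htU : t0 = "U"
        · rw [if_pos htU] at hS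
          rw [if_pos htU, if_pos htU]
          cases hx : (PySem.List.pyGet? (PySem.Str.split₀ c) 1).bind PySem.Int.ofStr? with
          | none => rw [hx] at hS; exact absurd hS (by simp)
          | some x =>
            rw [hx] at hS
            simp only at hS ⊢
            cases hchk : pvChkU n removed x kB with
            | none => rw [hchk] at hS; exact absurd hS (by simp)
            | some k' =>
              rw [hchk] at hS
              simp only [Option.map_some, Option.some.injEq] at hS
              subst hS
              have hh := pvChkU_hop n table del removed h4 hM hnd x kB k' hchk
              exact ⟨(del, removed, k'), by rw [hh.2], ⟨hh.1, h2, h3, hM, h4, h5, h6⟩, rfl, rfl⟩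
        · rw [if_neg htU] at hS
          rw [if_neg htU, if_neg htU]
          by_cases htD : t0 = "D"
          · rw [if_pos htD] at hS
            rw [if_pos htD, if_pos htD]
            cases hx : (PySem.List.pyGet? (PySem.Str.split₀ c) 1).bind PySem.Int.ofStr? with
            | none => rw [hx] at hS; exact absurd hS (by simp)
            | some x =>
              rw [hx] at hS
              simp only at hS ⊢
              cases hchk : pvChkD n removed x kB with
              | none => rw [hchk] at hS; exact absurd hS (by simp)
              | some k' =>
                rw [hchk] at hS
                simp only [Option.map_some, Option.some.injEq] at hS
                subst hS
                have hh := pvChkD_hop n table del removed h4 hM hnd x kB k' hchk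
                exact ⟨(del, removed, k'), by rw [hh.2], ⟨hh.1, h2, h3, hM, h4, h5, h6⟩, rfl, rfl⟩
          · rw [if_neg htD] at hS
            rw [if_neg htD, if_neg htD]
            simp only [Option.some.injEq] at hS
            subst hS
            exact ⟨(del, removed, kB), rfl, ⟨rfl, h2, h3, hM, h4, h5, h6⟩, rfl, rfl⟩
theorem pv_run (n : Int) : ∀ (cmds : List String)
    (stA : PySem.Dict Int (Int × Int) × List String × List (Int × Int × Int) × Int)
    (stB : List Bool × List Int × Int), pvInv n stA stB →
    pvSafeRun n (stB.2.1, stB.2.2) cmds = true →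
    pvInv n (cmds.foldl (pvStepA n) stA) (cmds.foldl (pvStepB n) stB) := by
  intro cmds
  induction cmds with
  | nil => intro stA stB h _; exact h
  | cons ch ct ih =>
    intro stA stB hI hR
    obtain ⟨table, answer, clear, kA⟩ := stA
    obtain ⟨del, removed, kB⟩ := stB
    have hk : kA = kB := hI.1
    subst hk
    rw [pvSafeRun] at hR
    cases hst : pvSafeStep n (removed, kA) ch with
    | none => rw [hst] at hR; simp at hR
    | some st' =>
      rw [hst] at hR
      simp only at hR
      obtain ⟨stB', hBeq, hInv, hc1, hc2⟩ := pv_step n ch table answer clear del removed kA st'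
        hI.2.1 hI.2.2.1 hI.2.2.2.1 hI.2.2.2.2.1 hI.2.2.2.2.2.1 hI.2.2.2.2.2.2 hst
      rw [List.foldl_cons, List.foldl_cons, hBeq]
      apply ih _ stB' hInv
      have hpr : st' = (stB'.2.1, stB'.2.2) := by
        obtain ⟨s1, s2⟩ := st'
        simp only at hc1 hc2
        rw [← hc1, ← hc2]
      rw [← hpr]
      exact hR

theorem pv_rep_getD (n : Int) (j : Nat) :
    (List.replicate n.toNat false).getD j false = false := by
  simp [List.getD_eq_getElem?_getD, List.getElem?_replicate]
  split_ifs <;> simp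

theorem pv_init (n k : Int) :
    pvInv n (pvBuildTable n, List.replicate n.toNat "O", ([] : List (Int × Int × Int)), k)
      (List.replicate n.toNat false, ([] : List Int), k) := by
  refine ⟨rfl, ?_, ?_, ?_, ?_, trivial, ?_⟩
  · simp [List.map_replicate, pvFlag]
  · simp only [List.length_replicate]
    omega
  · intro jn
    simp [pv_rep_getD]
  · intro i hi0 hin _
    rw [pvBuildTable_getD n i hi0 hin]
    have hdn : pvScanDn (List.replicate n.toNat false) (i - 1) = i - 1 := by
      rw [pvScanDn, pv_rep_getD]
      simp
    have hup : pvScanUp n (List.replicate n.toNat false) (i + 1) = i + 1 := by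
      rw [pvScanUp, pv_rep_getD]
      simp
    rw [hdn, hup]
  · intro e he
    cases he

-- ===== VERDICT (by name: the statement is the Claim_ definition above) =====
theorem solution_spec : Claim_equal_solution := by
  unfold Claim_equal_solution
  intro n k cmd _ hpre
  unfold Pre_solution at hpre
  unfold Spec_solution solution solution_alt
  simp only
  have hrun := pv_run n cmd _ _ (pv_init n k) hpre
  rw [hrun.2.1]
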